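/-
  THE SECOND IMAGE (c/toy2/toy2.bin: another program linked against the same base): the base's 41 proved contracts (the heap's eight among them) hold of IT too.
  Nothing of the base is proved again, and nothing of toy2 is proved at all: the ONE fact about this image is `baseIn` (its 20,480
  bytes from 100000H are the base's text), decided by the kernel. This is the Lean side of the base-image experiment
  (BASE-IMAGE.md): the accepted proofs of memset, __asan_load8_noabort, qsort, sin … (ProgX/Base/Spec/Proved) are about THIS image.
-/
import ProgX.Base.ImageFacts
import Toy2.Image
import Toy2.Symbols
namespace Toy2
open X86 X86.User Asan ProgX

set_option exponentiation.threshold 2000000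

/-- The second image: the bytes of c/toy2/toy2.bin with its symbols. -/
noncomputable def image : ProgX.Image := symbols.image imageBytes

/-- What link.ld asserts, for any file of `n` bytes with these symbols. -/
theorem image_ok_of (bytes : Array UInt8) (n : Nat) (hsize : bytes.size = n)
    (h1 : 0x100000 + n ≤ symbols.image_end) (h2 : symbols.image_end ≤ 0x1F0000)
    (h3 : ProgX.Base.symbols.text_cap ≤ 0x100000 + n) (h4 : 0x100000 ≤ ProgX.Base.symbols.text_cap) :
    (symbols.image bytes).OK := by
  subst hsize
  exact ⟨h1, h2, h3, h4⟩

/-- What link.ld asserts holds of the second image. -/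
theorem image_ok : image.OK :=
  image_ok_of imageBytes imageNat.size imageBytes_size (by decide) (by decide) (by decide) (by decide)

/-- The whole file, as the number, is in the start state's memory. -/
theorem image_isNat : ImageIsNat image imageNat imageNat.size :=
  ImageIsNat.of_bytes image_ok imageBytes_size imageBytes_codeNat

/-- **The second image contains the base.** -/
theorem baseIn : ProgX.Base.BaseIn imageNat imageNat.size := by
  decide +kernel

/-- **Every proved contract of the base holds in the start state of the second image**: memset, memcpy, memcmp, qsort, the
twelve check routines, libm … — with no hypothesis left. -/
theorem base_contracts (μ : Microarch) (hμ : UserX.MicroOK μ) (c : Nat) (hc : c = 0 ∨ c = 3) (inp : List UInt8) :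
    ProgX.Base.Closed.Contracts (startLayout c hc) μ (startU image c inp) :=
  ProgX.Base.Closed.closed (startLayout c hc) (startLayout_hi c hc) μ hμ (startU image c inp)
    (ProgX.Base.allCode_of_baseIn image_isNat baseIn c hc inp)

end Toy2

#print axioms Toy2.base_contracts
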